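-- pv_equiv track=rewrite | github.com/Fondamenti18/fondamenti-di-programmazione | students/1795039/homework02/program02.py | occurrences_finder
-- ===== SOURCE A (Python) =====
-- def occurrences_finder(rawDict,insi):
--
--     finalDict = {}
--
--     for element in insi:
--         if element in rawDict:
--             value = element
--             finalDict[element] = []
--             while rawDict[value] != "":
--                 finalDict[element].append(rawDict[value])
--                 value = rawDict[value]
--
--     return finalDict
-- ===== SOURCE B (Python) =====
-- def occurrences_finder(rawDict, insi):
--     cache = {}
--     finalDict = {}
--     for element in insi:
--         if element in rawDict:
--             finalDict[element] = _chain(rawDict, element, cache)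
--     return finalDict
--
--
-- def _chain(rawDict, start, cache):
--     # Walk the pointer chain until a cached node or the terminator "" is met,
--     # then fill the cache backwards so every visited node gets its full chain.
--     path = []
--     cur = start
--     while cur not in cache:
--         nxt = rawDict[cur]
--         if nxt == "":
--             cache[cur] = []
--             break
--         path.append(cur)
--         cur = nxt
--     for u in reversed(path):
--         nxt = rawDict[u]
--         cache[u] = [nxt] + cache[nxt]
--     return cache[start]
-- ===== Notes on version B (the rewrite author's own statement) =====
-- stated objective: faster
-- what changed: B memoizes the chain of every visited node in a cache (walk until a cached node or the terminator, then fill the cache backwards), so shared chain suffixes and repeated queries are never re-walked, instead of A re-following the full pointer chain from scratch for every element of insi; Pre_ excludes only the inputs where A raises KeyError or loops forever (a queried chain hitting a non-key or a cycle).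
import Mathlib
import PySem

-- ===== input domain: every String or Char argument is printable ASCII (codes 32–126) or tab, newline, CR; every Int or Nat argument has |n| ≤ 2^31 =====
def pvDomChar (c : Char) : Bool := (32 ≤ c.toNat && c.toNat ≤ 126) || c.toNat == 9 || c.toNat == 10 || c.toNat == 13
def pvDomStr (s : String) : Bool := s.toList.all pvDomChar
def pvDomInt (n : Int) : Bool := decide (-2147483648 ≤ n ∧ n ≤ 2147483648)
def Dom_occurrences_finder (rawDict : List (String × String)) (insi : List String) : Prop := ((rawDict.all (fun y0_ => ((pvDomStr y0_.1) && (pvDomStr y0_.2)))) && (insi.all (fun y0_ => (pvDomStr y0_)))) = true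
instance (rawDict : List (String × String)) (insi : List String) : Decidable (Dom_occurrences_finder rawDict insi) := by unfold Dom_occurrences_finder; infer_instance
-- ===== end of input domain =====

-- B memoizes pointer chains in a cache (walk to a cached node / terminator, fill backwards),
-- so shared suffixes and repeated queries are never re-walked; A re-follows every chain from scratch.


-- ===== PORT A =====
-- the 'while rawDict[value] != ""' loop; fuel (d.size+1) bounds it — under Pre_ the chain
-- terminates in at most d.size steps, so the fuel guard is never the reason to stop.
-- 'finalDict[element].append(x)' is ported as re-inserting the extended list.
-- d.get? = none is Python's KeyError (excluded by Pre_).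
def pvWhileA (d : PySem.Dict String String) (element : String) :
    Nat → PySem.Dict String (List String) → String → PySem.Dict String (List String)
  | 0, fd, _ => fd
  | f+1, fd, value =>
    match d.get? value with
    | none => fd
    | some nxt =>
      if nxt ≠ "" then pvWhileA d element f (fd.insert element (fd.getD element [] ++ [nxt])) nxt
      else fd

def occurrences_finder (rawDict : List (String × String)) (insi : List String) : List (String × List String) :=
  let d := PySem.Dict.ofList rawDict
  (insi.foldl (fun fd element =>
      if d.contains element then pvWhileA d element (d.size + 1) (fd.insert element []) element
      else fd)
    (PySem.Dict.empty : PySem.Dict String (List String))).items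

-- ===== PORT B =====
-- Source B's _chain: walk until a cached node or "" (Python appends to `path`; here we cons, so the
-- later left fold visits the nodes exactly in Python's reversed(path) order — same order, exact);
-- fuel as in port A; d.get? = none is Python's KeyError (excluded by Pre_).
def pvWalkB (d : PySem.Dict String String) :
    Nat → PySem.Dict String (List String) → String → List String → List String × PySem.Dict String (List String)
  | 0, cache, _, path => (path, cache)
  | f+1, cache, cur, path =>
    if cache.contains cur then (path, cache)
    else
      match d.get? cur with
      | none => (path, cache)
      | some nxt =>
        if nxt = "" then (path, cache.insert cur [])
        else pvWalkB d f cache nxt (cur :: path)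

-- Source B's 'for u in reversed(path): cache[u] = [rawDict[u]] + cache[rawDict[u]]'
def pvFillB (d : PySem.Dict String String) (path : List String)
    (cache : PySem.Dict String (List String)) : PySem.Dict String (List String) :=
  path.foldl (fun c u =>
      let nxt := d.getD u ""
      c.insert u (nxt :: c.getD nxt [])) cache

def pvChainB (d : PySem.Dict String String) (fuel : Nat) (cache : PySem.Dict String (List String))
    (start : String) : List String × PySem.Dict String (List String) :=
  let (path, c1) := pvWalkB d fuel cache start []
  let c2 := pvFillB d path c1
  (c2.getD start [], c2)

def occurrences_finder_alt (rawDict : List (String × String)) (insi : List String) : List (String × List String) :=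
  let d := PySem.Dict.ofList rawDict
  (insi.foldl (fun (st : PySem.Dict String (List String) × PySem.Dict String (List String)) element =>
      if d.contains element then
        let r := pvChainB d (d.size + 1) st.2 element
        (st.1.insert element r.1, r.2)
      else st)
    ((PySem.Dict.empty : PySem.Dict String (List String)), (PySem.Dict.empty : PySem.Dict String (List String)))).1.items

-- ===== PRECONDITION & SPEC =====
-- Pre_ excludes exactly the inputs where A raises KeyError (a queried chain hits a value that is
-- not a key of rawDict) or loops forever (a queried chain cycles): iterating the pointer map
-- d.get? from every queried element must reach the terminator "" — which, when it happens at
-- all, happens within size-many distinct keys, hence the bound k ≤ d.size.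
def Pre_occurrences_finder (rawDict : List (String × String)) (insi : List String) : Prop :=
  ∀ e ∈ insi, (PySem.Dict.ofList rawDict).contains e = true →
    ∃ k, k ≤ (PySem.Dict.ofList rawDict).size ∧
      (fun o => o.bind (PySem.Dict.ofList rawDict).get?)^[k+1] (some e) = some ""

instance (rawDict : List (String × String)) (insi : List String) : Decidable (Pre_occurrences_finder rawDict insi) := by
  unfold Pre_occurrences_finder; infer_instance

def pvWitness_occurrences_finder : (List (String × String)) × List String :=
  ([("a", "b"), ("b", "")], ["a", "b", "c"])

def Spec_occurrences_finder (rawDict : List (String × String)) (insi : List String) (out : List (String × List String)) : Prop := out = occurrences_finder_alt rawDict insi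
instance (rawDict : List (String × String)) (insi : List String) (out : List (String × List String)) : Decidable (Spec_occurrences_finder rawDict insi out) := by unfold Spec_occurrences_finder; infer_instance

-- ===== CLAIM (what is proved, stated in full; the proofs are below) =====
def Claim_equal_occurrences_finder : Prop := ∀ (rawDict : List (String × String)) (insi : List String), Dom_occurrences_finder rawDict insi → Pre_occurrences_finder rawDict insi → Spec_occurrences_finder rawDict insi (occurrences_finder rawDict insi)

-- ===== LEMMAS AND PROOFS =====

-- termination of the pointer chain within f lookups (the proofs' working form of Pre_)
def pvChainOk (d : PySem.Dict String String) : Nat → String → Bool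
  | 0, _ => false
  | f+1, v =>
    match d.get? v with
    | none => false
    | some nxt => if nxt = "" then true else pvChainOk d f nxt

theorem pvChainOk_iff_iterate (d : PySem.Dict String String) :
    ∀ f v, pvChainOk d f v = true ↔
      ∃ k, k < f ∧ (fun o => o.bind d.get?)^[k+1] (some v) = some "" := by
  intro f
  induction f with
  | zero => intro v; simp [pvChainOk]
  | succ f ih =>
    intro v
    simp only [pvChainOk]
    have hstep : ∀ k (x : String),
        (fun o => o.bind d.get?)^[k+1] (some x) = (fun o => o.bind d.get?)^[k] (d.get? x) := by
      intro k x
      rw [Function.iterate_succ_apply]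
      rfl
    cases hv : d.get? v with
    | none =>
      simp only
      constructor
      · intro h; cases h
      · rintro ⟨k, -, hk⟩
        rw [hstep, hv] at hk
        have : ∀ m, (fun o => o.bind d.get?)^[m] (none : Option String) = none := by
          intro m; induction m with
          | zero => rfl
          | succ m ihm => rw [Function.iterate_succ_apply, Option.bind]; exact ihm
        rw [this] at hk; cases hk
    | some nxt =>
      simp only
      by_cases hn : nxt = ""
      · subst hn
        constructor
        · intro _
          exact ⟨0, by omega, by rw [hstep, hv]; rfl⟩
        · intro _
          simp
      · rw [if_neg hn, ih nxt]
        constructor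
        · rintro ⟨k, hkf, hk⟩
          exact ⟨k + 1, by omega, by rw [hstep, hv]; exact hk⟩
        · rintro ⟨k, hkf, hk⟩
          rw [hstep, hv] at hk
          cases k with
          | zero => simp at hk; exact absurd hk hn
          | succ k => exact ⟨k, by omega, hk⟩

-- the mathematical chain value both loops compute
def pvSChain (d : PySem.Dict String String) : Nat → String → List String
  | 0, _ => []
  | f+1, v =>
    match d.get? v with
    | none => []
    | some nxt => if nxt = "" then [] else nxt :: pvSChain d f nxt

theorem pvSChain_eq_of_le (d : PySem.Dict String String) :
    ∀ f g v, f ≤ g → pvChainOk d f v = true → pvSChain d g v = pvSChain d f v := by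
  intro f
  induction f with
  | zero => intro g v _ h; simp [pvChainOk] at h
  | succ f ih =>
    intro g v hle h
    obtain ⟨g', rfl⟩ : ∃ g', g = g' + 1 := ⟨g - 1, by omega⟩
    simp only [pvChainOk] at h
    simp only [pvSChain]
    cases hv : d.get? v with
    | none => rfl
    | some nxt =>
      simp only [hv] at h ⊢
      by_cases hn : nxt = ""
      · simp [hn]
      · simp only [hn] at h ⊢
        rw [ih g' nxt (by omega) h]

theorem pvSChain_eq (d : PySem.Dict String String) {f g : Nat} {v : String}
    (hf : pvChainOk d f v = true) (hg : pvChainOk d g v = true) :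
    pvSChain d f v = pvSChain d g v := by
  rcases le_total f g with h | h
  · rw [pvSChain_eq_of_le d f g v h hf]
  · rw [pvSChain_eq_of_le d g f v h hg]

-- A's while loop appends exactly the chain of `value` to the entry of `element`
theorem pvWhileA_eq (d : PySem.Dict String String) (e : String) :
    ∀ f (fd : PySem.Dict String (List String)) (acc : List String) (v : String),
      pvWhileA d e f (fd.insert e acc) v = fd.insert e (acc ++ pvSChain d f v) := by
  intro f
  induction f with
  | zero => intro fd acc v; simp [pvWhileA, pvSChain]
  | succ f ih =>
    intro fd acc v
    simp only [pvWhileA, pvSChain]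
    cases hv : d.get? v with
    | none => simp
    | some nxt =>
      by_cases hn : nxt = ""
      · simp [hn]
      · simp only [hn, ne_eq, not_false_iff, if_true]
        rw [PySem.Dict.getD_insert_self, PySem.Dict.insert_insert_self, ih fd (acc ++ [nxt]) nxt]
        simp

-- cache invariant: every cached node has a terminating chain and stores exactly its chain value
def pvCacheOK (d : PySem.Dict String String) (c : PySem.Dict String (List String)) : Prop :=
  ∀ k, c.contains k = true →
    ∃ f, pvChainOk d f k = true ∧ c.getD k [] = pvSChain d f k

-- path shape maintained by the walk: consecutive pointers, all links nonempty
def pvLinked (d : PySem.Dict String String) : List String → String → Prop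
  | [], _ => True
  | u :: rest, w => d.get? u = some w ∧ w ≠ "" ∧ pvLinked d rest u

theorem pvFillB_spec (d : PySem.Dict String String) :
    ∀ (path : List String) (c : PySem.Dict String (List String)) (stop : String),
      pvCacheOK d c → c.contains stop = true → pvLinked d path stop →
      pvCacheOK d (pvFillB d path c) ∧
        (∀ u, (c.contains u = true ∨ u ∈ path) → (pvFillB d path c).contains u = true) := by
  intro path
  induction path with
  | nil =>
    intro c stop hok hstop _
    exact ⟨hok, fun u hu => by simpa [pvFillB] using hu.resolve_right (by simp)⟩
  | cons u rest ih =>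
    intro c stop hok hstop hlink
    obtain ⟨hu, hne, hrest⟩ := hlink
    obtain ⟨f, hf, hval⟩ := hok stop hstop
    have hnxt : d.getD u "" = stop := by simp [PySem.Dict.getD_eq_get?_getD, hu]
    have hstep : pvFillB d (u :: rest) c
        = pvFillB d rest (c.insert u (stop :: pvSChain d f stop)) := by
      simp [pvFillB, hnxt, hval]
    have hok' : pvCacheOK d (c.insert u (stop :: pvSChain d f stop)) := by
      intro k hk
      by_cases hku : k = u
      · subst hku
        refine ⟨f + 1, ?_, ?_⟩
        · simp [pvChainOk, hu, hne, hf]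
        · simp [PySem.Dict.getD_insert_self, pvSChain, hu, hne]
      · rw [PySem.Dict.contains_insert] at hk
        have hk' : c.contains k = true := by
          simpa [beq_iff_eq, hku] using hk
        obtain ⟨g, hg, hgv⟩ := hok k hk'
        exact ⟨g, hg, by rw [PySem.Dict.getD_insert]; simpa [hku] using hgv⟩
    have hcu : (c.insert u (stop :: pvSChain d f stop)).contains u = true :=
      PySem.Dict.contains_insert_self _ _ _
    obtain ⟨hok2, hcont2⟩ := ih (c.insert u (stop :: pvSChain d f stop)) u hok' hcu hrest
    rw [hstep]
    refine ⟨hok2, fun w hw => ?_⟩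
    rcases hw with hw | hw
    · exact hcont2 w (Or.inl (by rw [PySem.Dict.contains_insert, hw]; simp))
    · rcases List.mem_cons.mp hw with rfl | hw
      · exact hcont2 w (Or.inl hcu)
      · exact hcont2 w (Or.inr hw)

theorem pvWalkB_spec (d : PySem.Dict String String) :
    ∀ f (cur : String) (path : List String) (c : PySem.Dict String (List String)),
      pvCacheOK d c → pvChainOk d f cur = true → pvLinked d path cur →
      pvCacheOK d (pvFillB d (pvWalkB d f c cur path).1 (pvWalkB d f c cur path).2) ∧
        (∀ u, (c.contains u = true ∨ u = cur ∨ u ∈ path) →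
          (pvFillB d (pvWalkB d f c cur path).1 (pvWalkB d f c cur path).2).contains u = true) := by
  intro f
  induction f with
  | zero => intro cur path c _ h _; simp [pvChainOk] at h
  | succ f ih =>
    intro cur path c hok hterm hlink
    by_cases hc : c.contains cur = true
    · have hw : pvWalkB d (f+1) c cur path = (path, c) := by simp [pvWalkB, hc]
      rw [hw]
      obtain ⟨h1, h2⟩ := pvFillB_spec d path c cur hok hc hlink
      exact ⟨h1, fun u hu => h2 u (by rcases hu with h | rfl | h; exacts [Or.inl h, Or.inl hc, Or.inr h])⟩
    · simp only [pvChainOk] at hterm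
      cases hv : d.get? cur with
      | none => simp [hv] at hterm
      | some nxt =>
        simp only [hv] at hterm
        by_cases hn : nxt = ""
        · subst hn
          have hw : pvWalkB d (f+1) c cur path = (path, c.insert cur []) := by
            simp [pvWalkB, hc, hv]
          rw [hw]
          have hok' : pvCacheOK d (c.insert cur []) := by
            intro k hk
            by_cases hkc : k = cur
            · subst hkc
              exact ⟨1, by simp [pvChainOk, hv], by simp [PySem.Dict.getD_insert_self, pvSChain, hv]⟩
            · rw [PySem.Dict.contains_insert] at hk
              have hk' : c.contains k = true := by simpa [beq_iff_eq, hkc] using hk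
              obtain ⟨g, hg, hgv⟩ := hok k hk'
              exact ⟨g, hg, by rw [PySem.Dict.getD_insert]; simpa [hkc] using hgv⟩
          have hcc : (c.insert cur ([] : List String)).contains cur = true :=
            PySem.Dict.contains_insert_self _ _ _
          obtain ⟨h1, h2⟩ := pvFillB_spec d path (c.insert cur []) cur hok' hcc hlink
          refine ⟨h1, fun u hu => h2 u ?_⟩
          rcases hu with h | rfl | h
          · exact Or.inl (by rw [PySem.Dict.contains_insert, h]; simp)
          · exact Or.inl hcc
          · exact Or.inr h
        · simp only [hn] at hterm
          have hw : pvWalkB d (f+1) c cur path = pvWalkB d f c nxt (cur :: path) := by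
            simp [pvWalkB, hc, hv, hn]
          rw [hw]
          obtain ⟨h1, h2⟩ := ih nxt (cur :: path) c hok hterm ⟨hv, hn, hlink⟩
          refine ⟨h1, fun u hu => h2 u ?_⟩
          rcases hu with h | rfl | h
          · exact Or.inl h
          · exact Or.inr (Or.inr (List.mem_cons_self))
          · exact Or.inr (Or.inr (List.mem_cons_of_mem _ h))

theorem pvChainB_spec (d : PySem.Dict String String) (f : Nat) (c : PySem.Dict String (List String))
    (start : String) (hok : pvCacheOK d c) (hterm : pvChainOk d f start = true) :
    (pvChainB d f c start).1 = pvSChain d f start ∧ pvCacheOK d (pvChainB d f c start).2 := by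
  obtain ⟨h1, h2⟩ := pvWalkB_spec d f start [] c hok hterm trivial
  have hcont := h2 start (Or.inr (Or.inl rfl))
  obtain ⟨g, hg, hgv⟩ := h1 start hcont
  constructor
  · show (pvFillB d (pvWalkB d f c start []).1 (pvWalkB d f c start []).2).getD start [] = _
    rw [hgv]
    exact pvSChain_eq d hg hterm
  · exact h1

theorem pvMainLoop (d : PySem.Dict String String) :
    ∀ (l : List String) (fd : PySem.Dict String (List String)) (cache : PySem.Dict String (List String)),
      pvCacheOK d cache →
      (∀ e ∈ l, d.contains e = true → pvChainOk d (d.size + 1) e = true) →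
      l.foldl (fun fd element =>
          if d.contains element then pvWhileA d element (d.size + 1) (fd.insert element []) element
          else fd) fd
        = (l.foldl (fun (st : PySem.Dict String (List String) × PySem.Dict String (List String)) element =>
            if d.contains element then
              let r := pvChainB d (d.size + 1) st.2 element
              (st.1.insert element r.1, r.2)
            else st) (fd, cache)).1 := by
  intro l
  induction l with
  | nil => intro fd cache _ _; rfl
  | cons e rest ih =>
    intro fd cache hok hpre
    simp only [List.foldl_cons]
    by_cases he : d.contains e = true
    · have hterm := hpre e (List.mem_cons_self) he
      obtain ⟨hv, hok'⟩ := pvChainB_spec d (d.size + 1) cache e hok hterm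
      have hA : pvWhileA d e (d.size + 1) (fd.insert e []) e = fd.insert e (pvSChain d (d.size + 1) e) := by
        rw [pvWhileA_eq d e (d.size + 1) fd [] e]; rfl
      rw [if_pos he, if_pos he, hA]
      have := ih (fd.insert e (pvSChain d (d.size + 1) e)) (pvChainB d (d.size + 1) cache e).2 hok'
        (fun x hx hcx => hpre x (List.mem_cons_of_mem _ hx) hcx)
      rw [this, hv]
    · rw [if_neg he, if_neg he]
      exact ih fd cache hok (fun x hx hcx => hpre x (List.mem_cons_of_mem _ hx) hcx)

-- ===== VERDICT (by name: the statement is the Claim_ definition above) =====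
theorem occurrences_finder_spec : Claim_equal_occurrences_finder := by
  intro rawDict insi _hdom hpre
  unfold Spec_occurrences_finder
  simp only [occurrences_finder, occurrences_finder_alt]
  have hpre' : ∀ e ∈ insi, (PySem.Dict.ofList rawDict).contains e = true →
      pvChainOk (PySem.Dict.ofList rawDict) ((PySem.Dict.ofList rawDict).size + 1) e = true := by
    intro e he hce
    obtain ⟨k, hk, hit⟩ := hpre e he hce
    exact (pvChainOk_iff_iterate _ _ _).mpr ⟨k, by omega, hit⟩
  have h := pvMainLoop (PySem.Dict.ofList rawDict) insi PySem.Dict.empty PySem.Dict.empty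
    (fun k hk => by simp [PySem.Dict.contains_empty] at hk) hpre'
  rw [h]
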